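-- pv_equiv track=rewrite | github.com/nolanroosa/intermediatePython | lab2.py | subCaps
-- ===== SOURCE A (Python) =====
-- def subCaps(alphabet):
--     bigalphabet = []
--     for i in range(0,len(alphabet)):
--         littlelist = []
--         for j in range(i+1):
--             littlelist.append(alphabet[j])
--         bigalphabet.append(littlelist)
--     return bigalphabet
-- ===== SOURCE B (Python) =====
-- def subCaps(alphabet):
--     result = []
--     cur = []
--     for x in alphabet:
--         cur = cur + [x]
--         result.append(cur)
--     return result
-- ===== Notes on version B (the rewrite author's own statement) =====
-- stated objective: simpler
-- what changed: Replaced the nested index loops (rebuilding each prefix element-by-element via range and indexing) with a single pass over the elements that extends a running prefix accumulator and appends a fresh copy each step.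
import Mathlib
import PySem

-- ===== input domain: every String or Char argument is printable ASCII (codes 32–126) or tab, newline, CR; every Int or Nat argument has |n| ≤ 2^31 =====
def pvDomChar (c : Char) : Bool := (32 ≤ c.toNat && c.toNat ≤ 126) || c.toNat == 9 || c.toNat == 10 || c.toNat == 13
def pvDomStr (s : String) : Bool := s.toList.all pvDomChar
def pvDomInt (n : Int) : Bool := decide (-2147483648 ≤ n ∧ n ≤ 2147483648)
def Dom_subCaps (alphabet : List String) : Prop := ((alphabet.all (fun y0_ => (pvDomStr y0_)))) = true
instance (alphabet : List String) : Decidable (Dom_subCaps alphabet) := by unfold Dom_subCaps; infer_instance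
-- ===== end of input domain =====

-- B replaces A's nested index loops by one pass carrying a running prefix accumulator (simpler).

-- ===== PORT A =====
def subCaps (alphabet : List String) : List (List String) :=
  (PySem.List.pyRange 0 (alphabet.length : Int) 1).foldl
    (fun bigalphabet i =>
      bigalphabet ++
        [(PySem.List.pyRange 0 (i + 1) 1).foldl
          (fun littlelist j => littlelist ++ [PySem.List.pyGetD alphabet j ""]) []])
    []

-- ===== PORT B =====
def subCapsLoop (xs : List String) (cur : List String) (result : List (List String)) :
    List (List String) :=
  match xs with
  | [] => result
  | x :: rest =>
      let cur' := cur ++ [x]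
      subCapsLoop rest cur' (result ++ [cur'])

def subCaps_alt (alphabet : List String) : List (List String) :=
  subCapsLoop alphabet [] []

-- ===== PRECONDITION & SPEC =====
def Spec_subCaps (alphabet : List String) (out : List (List String)) : Prop := out = subCaps_alt alphabet
instance (alphabet : List String) (out : List (List String)) : Decidable (Spec_subCaps alphabet out) := by unfold Spec_subCaps; infer_instance

-- ===== CLAIM (what is proved, stated in full; the proofs are below) =====
def Claim_equal_subCaps : Prop := ∀ (alphabet : List String), Dom_subCaps alphabet → Spec_subCaps alphabet (subCaps alphabet)

-- ===== LEMMAS AND PROOFS =====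

-- inner loop of A builds the first k elements of alphabet
lemma inner_eq_take (alphabet : List String) (k : ℕ) (hk : k ≤ alphabet.length) :
    (PySem.List.pyRange 0 (k : Int) 1).foldl
      (fun littlelist j => littlelist ++ [PySem.List.pyGetD alphabet j ""]) []
      = alphabet.take k := by
  induction k with
  | zero => simp [PySem.List.pyRange_one_eq_nil]
  | succ n ih =>
    have h1 : ((n : Int) + 1) = ((n + 1 : ℕ) : Int) := by push_cast; ring
    rw [show ((n + 1 : ℕ) : Int) = (n : Int) + 1 by push_cast; ring,
        PySem.List.pyRange_one_succ_right (by positivity)]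
    rw [List.foldl_append, ih (by omega)]
    have hlt : n < alphabet.length := by omega
    simp only [List.foldl_cons, List.foldl_nil, PySem.List.pyGetD_natCast]
    rw [List.getD_eq_getElem?_getD, List.getElem?_eq_getElem hlt]
    rw [List.take_add_one, List.getElem?_eq_getElem hlt]
    simp

lemma subCaps_eq_map (alphabet : List String) :
    subCaps alphabet = (List.range alphabet.length).map (fun i => alphabet.take (i + 1)) := by
  unfold subCaps
  rw [PySem.List.foldl_append_singleton_eq_map]
  rw [PySem.List.pyRange_one]
  simp only [List.map_map]
  apply List.map_congr_left
  intro i hi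
  simp only [List.mem_range] at hi
  simp only [Function.comp, zero_add, Int.sub_zero, Int.toNat_natCast] at *
  have : ((i : Int) + 1) = ((i + 1 : ℕ) : Int) := by push_cast; ring
  rw [this, inner_eq_take alphabet (i + 1) (by omega)]

lemma subCapsLoop_eq (xs cur : List String) (res : List (List String)) :
    subCapsLoop xs cur res
      = res ++ (List.range xs.length).map (fun i => cur ++ xs.take (i + 1)) := by
  induction xs generalizing cur res with
  | nil => simp [subCapsLoop]
  | cons x rest ih =>
    rw [subCapsLoop, ih]
    simp only [List.length_cons, List.range_succ_eq_map, List.map_cons, List.map_map]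
    simp [Function.comp, List.append_assoc]

-- ===== VERDICT (by name: the statement is the Claim_ definition above) =====
theorem subCaps_spec : Claim_equal_subCaps := by
  intro alphabet _
  unfold Spec_subCaps subCaps_alt
  rw [subCaps_eq_map, subCapsLoop_eq]
  simp
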